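-- pv_equiv track=rewrite | github.com/polaris64/advent-of-code | 2018/07/solve.py | next_task
-- ===== SOURCE A (Python) =====
-- def next_task(rules, steps, done, started):
--     for step in steps:
--         if step in done or step in started:
--             continue
--         required = set()
--         for rule in rules:
--             if rule[1] == step:
--                 required.add(rule[0])
--         if len(required.difference(done)) == 0:
--             return (step, True)
--     return (None, False)
-- ===== SOURCE B (Python) =====
-- def next_task(rules, steps, done, started):
--     blocked = {rule[1] for rule in rules if rule[0] not in done}
--     for step in steps:
--         if step in done or step in started:
--             continue
--         if step not in blocked:
--             return (step, True)
--     return (None, False)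
-- ===== Notes on version B (the rewrite author's own statement) =====
-- stated objective: alternative
-- what changed: Replaces the per-step inner rescan of rules plus set-difference with one pass building a 'blocked' set of steps having an undone prerequisite, then a flat membership scan of steps.
import Mathlib
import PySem

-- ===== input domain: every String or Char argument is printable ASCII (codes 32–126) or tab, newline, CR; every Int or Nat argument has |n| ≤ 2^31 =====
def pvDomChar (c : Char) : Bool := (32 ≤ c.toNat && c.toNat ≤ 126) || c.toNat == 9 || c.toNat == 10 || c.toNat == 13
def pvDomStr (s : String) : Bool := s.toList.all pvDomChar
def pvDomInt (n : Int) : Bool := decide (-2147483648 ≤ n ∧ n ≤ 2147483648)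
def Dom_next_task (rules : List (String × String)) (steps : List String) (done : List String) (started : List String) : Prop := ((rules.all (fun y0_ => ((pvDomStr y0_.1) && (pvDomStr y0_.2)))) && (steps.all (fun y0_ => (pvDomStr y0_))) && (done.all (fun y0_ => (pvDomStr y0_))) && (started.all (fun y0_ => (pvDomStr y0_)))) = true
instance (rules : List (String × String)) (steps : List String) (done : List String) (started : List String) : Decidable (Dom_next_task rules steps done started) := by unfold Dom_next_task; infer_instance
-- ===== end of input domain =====

-- B builds the set of blocked steps in one pass over rules, then scans steps with a plain membership test (objective: alternative decomposition).

-- ===== PORT A =====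
-- per-step scan: collect required = {rule[0] : rule[1] == step}, return step if required - done is empty
def nextTaskGoA (rules : List (String × String)) (done started : List String) : List String → Option String × Bool
  | [] => (none, false)
  | step :: rest =>
    if done.contains step || started.contains step then
      nextTaskGoA rules done started rest
    else
      if PySem.Set.len (PySem.Set.diff
           (rules.foldl (fun s r => if r.2 == step then PySem.Set.add s r.1 else s) PySem.Set.empty) done) == 0
      then (some step, true)
      else nextTaskGoA rules done started rest

def next_task (rules : List (String × String)) (steps : List String) (done : List String) (started : List String) : Option String × Bool :=
  nextTaskGoA rules done started steps

-- ===== PORT B =====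
-- scan steps, skipping done/started, returning the first step not in blocked
def nextTaskGoB (blocked : PySem.Set String) (done started : List String) : List String → Option String × Bool
  | [] => (none, false)
  | step :: rest =>
    if done.contains step || started.contains step then
      nextTaskGoB blocked done started rest
    else if blocked.contains step then
      nextTaskGoB blocked done started rest
    else (some step, true)

def next_task_alt (rules : List (String × String)) (steps : List String) (done : List String) (started : List String) : Option String × Bool :=
  let blocked : PySem.Set String :=
    PySem.Set.ofList ((rules.filter (fun r => !done.contains r.1)).map (fun r => r.2))
  nextTaskGoB blocked done started steps

-- ===== PRECONDITION & SPEC =====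
def Spec_next_task (rules : List (String × String)) (steps : List String) (done : List String) (started : List String) (out : Option String × Bool) : Prop := out = next_task_alt rules steps done started
instance (rules : List (String × String)) (steps : List String) (done : List String) (started : List String) (out : Option String × Bool) : Decidable (Spec_next_task rules steps done started out) := by unfold Spec_next_task; infer_instance

-- ===== CLAIM (what is proved, stated in full; the proofs are below) =====
def Claim_equal_next_task : Prop := ∀ (rules : List (String × String)) (steps : List String) (done : List String) (started : List String), Dom_next_task rules steps done started → Spec_next_task rules steps done started (next_task rules steps done started)

-- ===== LEMMAS AND PROOFS =====

-- membership in A's foldl-built 'required' set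
lemma mem_required (rules : List (String × String)) (step : String) (acc : PySem.Set String) (x : String) :
    x ∈ rules.foldl (fun s r => if r.2 == step then PySem.Set.add s r.1 else s) acc ↔
      x ∈ acc ∨ ∃ r ∈ rules, r.2 = step ∧ r.1 = x := by
  induction rules generalizing acc with
  | nil => simp
  | cons r rs ih =>
    simp only [List.foldl_cons, ih]
    by_cases h : r.2 = step <;> simp [h, PySem.Set.mem_add] <;> aesop

-- the two emptiness/blocked tests agree
lemma cond_eq (rules : List (String × String)) (done : List String) (step : String) :
    (PySem.Set.len (PySem.Set.diff
        (rules.foldl (fun s r => if r.2 == step then PySem.Set.add s r.1 else s) PySem.Set.empty) done) == 0) =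
      !(PySem.Set.ofList ((rules.filter (fun r => !done.contains r.1)).map (fun r => r.2))).contains step := by
  rcases Bool.eq_false_or_eq_true ((PySem.Set.ofList ((rules.filter (fun r => !done.contains r.1)).map (fun r => r.2))).contains step) with hb | hb
  · -- blocked: some prerequisite of step is undone, so the difference is nonempty
    rw [hb]
    have hmem := (PySem.Set.contains_iff _ _).mp hb
    rw [PySem.Set.mem_ofList] at hmem
    rcases List.mem_map.mp hmem with ⟨r, hrm, h2⟩
    rcases List.mem_filter.mp hrm with ⟨hr, hnd⟩
    have hx : r.1 ∈ PySem.Set.diff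
        (rules.foldl (fun s r' => if r'.2 == step then PySem.Set.add s r'.1 else s) PySem.Set.empty) done := by
      rw [PySem.Set.mem_diff]
      refine ⟨(mem_required rules step _ r.1).mpr (Or.inr ⟨r, hr, h2, rfl⟩), ?_⟩
      simpa using hnd
    have hne : PySem.Set.diff
        (rules.foldl (fun s r' => if r'.2 == step then PySem.Set.add s r'.1 else s) PySem.Set.empty) done ≠ [] :=
      List.ne_nil_of_mem hx
    rw [Bool.not_true, Bool.eq_false_iff]
    intro hcontra
    have hlen := (beq_iff_eq).mp hcontra
    simp only [PySem.Set.len, Nat.cast_eq_zero] at hlen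
    exact hne (List.eq_nil_of_length_eq_zero hlen)
  · -- not blocked: every prerequisite of step is done
    rw [hb]
    have hnb : ∀ r ∈ rules, r.2 = step → r.1 ∈ done := by
      intro r hr h2
      by_contra hnd
      have hm : step ∈ (rules.filter (fun r => !done.contains r.1)).map (fun r => r.2) := by
        refine List.mem_map.mpr ⟨r, List.mem_filter.mpr ⟨hr, ?_⟩, h2⟩
        simpa using hnd
      have hc := (PySem.Set.contains_iff _ _).mpr ((PySem.Set.mem_ofList _ _).mpr hm)
      rw [hb] at hc
      exact Bool.false_ne_true hc
    have hdiff : PySem.Set.diff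
        (rules.foldl (fun s r => if r.2 == step then PySem.Set.add s r.1 else s) PySem.Set.empty) done = [] := by
      rw [List.eq_nil_iff_forall_not_mem]
      intro x hx
      rw [PySem.Set.mem_diff] at hx
      rcases hx with ⟨hxr, hxd⟩
      rcases (mem_required rules step _ x).mp hxr with h | ⟨r, hr, h2, h1⟩
      · simp [PySem.Set.empty] at h
      · exact hxd (h1 ▸ hnb r hr h2)
    rw [hdiff]
    rfl

lemma go_eq (rules : List (String × String)) (done started : List String) (steps : List String) :
    nextTaskGoA rules done started steps =
      nextTaskGoB (PySem.Set.ofList ((rules.filter (fun r => !done.contains r.1)).map (fun r => r.2))) done started steps := by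
  induction steps with
  | nil => rfl
  | cons step rest ih =>
    rw [nextTaskGoA, nextTaskGoB]
    cases h : (done.contains step || started.contains step) with
    | true => rw [if_pos rfl, if_pos rfl]; exact ih
    | false =>
      rw [if_neg Bool.false_ne_true, if_neg Bool.false_ne_true, cond_eq rules done step]
      cases hb : (PySem.Set.ofList ((rules.filter (fun r => !done.contains r.1)).map (fun r => r.2))).contains step with
      | true =>
        rw [if_neg (by decide), if_pos rfl]
        exact ih
      | false =>
        rw [if_pos (show (!false) = true from rfl), if_neg Bool.false_ne_true]

-- ===== VERDICT (by name: the statement is the Claim_ definition above) =====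
theorem next_task_spec : Claim_equal_next_task := by
  intro rules steps done started _
  unfold Spec_next_task next_task next_task_alt
  exact go_eq rules done started steps
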